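-- pv_equiv track=rewrite | github.com/rcourtman/Pulse | scripts/release_control/mobile_relay_auth_approvals_proof.py | summarize_output
-- ===== SOURCE A (Python) =====
-- def summarize_output(stdout: str, stderr: str) -> str:
--     text = "\n".join(part.strip() for part in (stdout, stderr) if part.strip()).strip()
--     if not text:
--         return "pass"
--     lines = [line.strip() for line in text.splitlines() if line.strip()]
--     summary = lines[-1]
--     if len(summary) > 240:
--         return summary[:237] + "..."
--     return summary
-- ===== SOURCE B (Python) =====
-- def summarize_output(stdout: str, stderr: str) -> str:
--     # Reverse scan: stderr takes priority over stdout; first non-empty stripped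
--     # line from the end wins; no join/re-split of the combined text.
--     for part in (stderr, stdout):
--         for line in reversed(part.strip().splitlines()):
--             line = line.strip()
--             if line:
--                 return line[:237] + "..." if len(line) > 240 else line
--     return "pass"
-- ===== Notes on version B (the rewrite author's own statement) =====
-- stated objective: simpler
-- what changed: Replaces A's join-strip-resplit-filter-index pipeline with a reverse scan with early exit: stderr then stdout, walking each part's lines from the end and returning the first non-empty stripped line (same >240 truncation), 'pass' if none.
import Mathlib
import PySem

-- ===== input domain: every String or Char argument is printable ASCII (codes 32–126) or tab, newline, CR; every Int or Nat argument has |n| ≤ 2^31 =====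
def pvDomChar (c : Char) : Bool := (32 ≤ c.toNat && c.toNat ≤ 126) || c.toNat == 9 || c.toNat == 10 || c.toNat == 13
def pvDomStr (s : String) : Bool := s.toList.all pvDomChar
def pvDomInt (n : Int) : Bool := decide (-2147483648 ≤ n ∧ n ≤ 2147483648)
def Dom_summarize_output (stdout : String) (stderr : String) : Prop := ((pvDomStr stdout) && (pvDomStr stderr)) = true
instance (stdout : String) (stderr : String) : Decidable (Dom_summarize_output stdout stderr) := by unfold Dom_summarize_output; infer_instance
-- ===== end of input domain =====

-- B replaces A's join/strip/re-split pipeline with a reverse scan with early exit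
-- (stderr before stdout, last non-empty stripped line, same truncation): a simpler decomposition, same cost.


-- ===== PORT A =====
def summarize_output (stdout : String) (stderr : String) : String :=
  let text := PySem.Chars.strip (PySem.Chars.join ['\n']
    (([stdout.toList, stderr.toList].filter (fun p => !(PySem.Chars.strip p).isEmpty)).map PySem.Chars.strip))
  if text.isEmpty then "pass" else
    let lines := ((PySem.Chars.splitlines text).map PySem.Chars.strip).filter (fun l => !l.isEmpty)
    let summary := PySem.List.pyGetD lines (-1) []
    if 240 < PySem.Chars.len summary then
      String.ofList (PySem.Chars.slice summary none (some 237) ++ "...".toList)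
    else
      String.ofList summary

-- ===== PORT B =====
-- truncation of Source B's returned line: line[:237] + "..." if len(line) > 240 else line
def pvTrunc (s : List Char) : String :=
  if 240 < PySem.Chars.len s then
    String.ofList (PySem.Chars.slice s none (some 237) ++ "...".toList)
  else
    String.ofList s

-- Source B's inner loop: the reversed lines, first one whose strip is non-empty
def pvScanRev : List (List Char) → Option (List Char)
  | [] => none
  | l :: ls => let s := PySem.Chars.strip l; if s.isEmpty then pvScanRev ls else some s

def summarize_output_alt (stdout : String) (stderr : String) : String :=
  match pvScanRev (PySem.Chars.splitlines (PySem.Chars.strip stderr.toList)).reverse with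
  | some s => pvTrunc s
  | none =>
    match pvScanRev (PySem.Chars.splitlines (PySem.Chars.strip stdout.toList)).reverse with
    | some s => pvTrunc s
    | none => "pass"

-- ===== PRECONDITION & SPEC =====
def Spec_summarize_output (stdout : String) (stderr : String) (out : String) : Prop := out = summarize_output_alt stdout stderr
instance (stdout : String) (stderr : String) (out : String) : Decidable (Spec_summarize_output stdout stderr out) := by unfold Spec_summarize_output; infer_instance

-- ===== CLAIM (what is proved, stated in full; the proofs are below) =====
def Claim_equal_summarize_output : Prop := ∀ (stdout : String) (stderr : String), Dom_summarize_output stdout stderr → Spec_summarize_output stdout stderr (summarize_output stdout stderr)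

-- ===== LEMMAS AND PROOFS =====

theorem pv_strip_eq_nil_iff (l : List Char) :
    PySem.Chars.strip l = [] ↔ ∀ c ∈ l, PySem.Chars.isspace c := by
  simp only [PySem.Chars.strip, PySem.Chars.rstrip, PySem.Chars.lstrip, List.reverse_eq_nil_iff,
    List.dropWhile_eq_nil_iff, List.mem_reverse]
  constructor
  · intro h c hc
    rw [← List.takeWhile_append_dropWhile (p := PySem.Chars.isspace) (l := l)] at hc
    rcases List.mem_append.1 hc with h1 | h1
    · exact List.mem_takeWhile_imp h1
    · exact h c h1
  · intro h c hc
    exact h c ((List.dropWhile_sublist (p := PySem.Chars.isspace) (l := l)).mem hc)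

theorem pv_head_dropWhile {p : Char → Bool} {l : List Char} {c : Char}
    (h : (List.dropWhile p l).head? = some c) : p c = false := by
  induction l with
  | nil => simp at h
  | cons x xs ih =>
    rw [List.dropWhile_cons] at h
    split at h
    · exact ih h
    · simp_all

theorem pv_head_strip {l : List Char} {c : Char}
    (h : (PySem.Chars.strip l).head? = some c) : PySem.Chars.isspace c = false := by
  have hpre : PySem.Chars.strip l <+: PySem.Chars.lstrip l := by
    simp only [PySem.Chars.strip, PySem.Chars.rstrip]
    have := List.reverse_prefix.mpr (List.dropWhile_suffix (l := (PySem.Chars.lstrip l).reverse) PySem.Chars.isspace)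
    simpa using this
  obtain ⟨r, hr⟩ := hpre
  have : (PySem.Chars.lstrip l).head? = some c := by
    rw [← hr]
    cases hs : PySem.Chars.strip l with
    | nil => rw [hs] at h; simp at h
    | cons a t =>
      rw [hs] at h
      simp at h
      subst h
      rfl
  exact pv_head_dropWhile (p := PySem.Chars.isspace) (by simpa [PySem.Chars.lstrip] using this)

theorem pv_getLast_strip {l : List Char} {c : Char}
    (h : (PySem.Chars.strip l).getLast? = some c) : PySem.Chars.isspace c = false := by
  have : (List.dropWhile PySem.Chars.isspace (PySem.Chars.lstrip l).reverse).head? = some c := by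
    simpa [PySem.Chars.strip, PySem.Chars.rstrip, List.getLast?_reverse] using h
  exact pv_head_dropWhile this

theorem pv_strip_self {t : List Char}
    (hh : ∀ c, t.head? = some c → PySem.Chars.isspace c = false)
    (hl : ∀ c, t.getLast? = some c → PySem.Chars.isspace c = false) :
    PySem.Chars.strip t = t := by
  cases t with
  | nil => rfl
  | cons a s =>
    have h1 : PySem.Chars.lstrip (a :: s) = a :: s := by
      simp [PySem.Chars.lstrip, hh a rfl]
    simp only [PySem.Chars.strip, h1, PySem.Chars.rstrip]
    cases hr : (a :: s).reverse with
    | nil => simp at hr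
    | cons b r =>
      have hb : (a :: s).getLast? = some b := by rw [← List.head?_reverse]; simp [hr]
      have hd : List.dropWhile PySem.Chars.isspace (b :: r) = b :: r := by
        rw [List.dropWhile_cons, hl b hb]; simp
      rw [hd, ← hr, List.reverse_reverse]

def pvIsB (c : Char) : Bool :=
  have n := c.toNat;
  decide (n = 10) || decide (n = 13) || decide (n = 11) || decide (n = 12) || decide (n = 28) || decide (n = 29) ||
          decide (n = 30) ||
        decide (n = 133) ||
      decide (n = 8232) ||
    decide (n = 8233)

theorem pv_isB_isspace {c : Char} (h : pvIsB c = true) : PySem.Chars.isspace c = true := by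
  simp [pvIsB] at h
  simp [PySem.Chars.isspace]
  omega

theorem pv_strip_idem (p : List Char) :
    PySem.Chars.strip (PySem.Chars.strip p) = PySem.Chars.strip p := by
  exact pv_strip_self (fun c hc => pv_head_strip hc) (fun c hc => pv_getLast_strip hc)

theorem pv_getLast?_cons {α : Type} (c : α) {t : List α} (h : t ≠ []) : (c :: t).getLast? = t.getLast? := by
  cases t with
  | nil => exact absurd rfl h
  | cons x xs => exact List.getLast?_cons_cons ..

theorem pv_strip_append {x y : List Char} (hx : PySem.Chars.strip x = x)
    (hy : PySem.Chars.strip y = y) (hxe : x ≠ []) (hye : y ≠ []) :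
    PySem.Chars.strip (x ++ '\n' :: y) = x ++ '\n' :: y := by
  apply pv_strip_self
  · intro c hc
    apply pv_head_strip (l := x)
    rw [hx]
    rwa [List.head?_append_of_ne_nil _ hxe] at hc
  · intro c hc
    apply pv_getLast_strip (l := y)
    rw [hy]
    rw [List.getLast?_append_of_ne_nil _ (by simp)] at hc
    rwa [pv_getLast?_cons '\n' hye] at hc

theorem pv_go_nil' (cur : List Char) (acc : List (List Char)) :
    PySem.Chars.splitlines.go pvIsB [] cur acc =
      if cur.isEmpty then acc.reverse else (cur.reverse :: acc).reverse := by
  simp [PySem.Chars.splitlines.go]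

theorem pv_go_crlf' (rest cur : List Char) (acc : List (List Char)) :
    PySem.Chars.splitlines.go pvIsB ('\r' :: '\n' :: rest) cur acc =
      PySem.Chars.splitlines.go pvIsB rest [] (cur.reverse :: acc) := by
  simp [PySem.Chars.splitlines.go]

theorem pv_go_cons' (c : Char) (rest cur : List Char) (acc : List (List Char))
    (h : ¬ (c = '\r' ∧ rest.head? = some '\n')) :
    PySem.Chars.splitlines.go pvIsB (c :: rest) cur acc =
      if pvIsB c then PySem.Chars.splitlines.go pvIsB rest [] (cur.reverse :: acc)
      else PySem.Chars.splitlines.go pvIsB rest (c :: cur) acc := by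
  match rest, h with
  | [], h => simp [PySem.Chars.splitlines.go]
  | c2 :: rest, h =>
    by_cases h1 : c = '\r' <;> by_cases h2 : c2 = '\n'
    · exact absurd ⟨h1, by simp [h2]⟩ h
    · subst h1; simp [PySem.Chars.splitlines.go, h2]
    · subst h2; simp [PySem.Chars.splitlines.go, h1]
    · simp [PySem.Chars.splitlines.go, h1, h2]

theorem pv_splitlines_go (s : List Char) :
    PySem.Chars.splitlines s = PySem.Chars.splitlines.go pvIsB s [] [] := rfl

theorem pv_go_acc_aux (n : Nat) : ∀ (s : List Char), s.length ≤ n → ∀ (cur : List Char) (acc : List (List Char)),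
    PySem.Chars.splitlines.go pvIsB s cur acc =
      acc.reverse ++ PySem.Chars.splitlines.go pvIsB s cur [] := by
  induction n with
  | zero =>
    intro s hs cur acc
    rw [List.length_eq_zero_iff.1 (Nat.le_zero.1 hs)]
    rw [pv_go_nil', pv_go_nil']
    split <;> simp
  | succ n ih =>
    intro s hs cur acc
    cases s with
    | nil => rw [pv_go_nil', pv_go_nil']; split <;> simp
    | cons c rest =>
      by_cases hcr : c = '\r' ∧ rest.head? = some '\n'
      · obtain ⟨h1, h2⟩ := hcr
        cases rest with
        | nil => simp at h2
        | cons c2 rest' =>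
          simp at h2
          subst h1; subst h2
          rw [pv_go_crlf', pv_go_crlf']
          rw [ih rest' (by simp at hs; omega) [] (cur.reverse :: acc),
              ih rest' (by simp at hs; omega) [] (cur.reverse :: [])]
          simp
      · rw [pv_go_cons' c rest cur acc hcr, pv_go_cons' c rest cur [] hcr]
        split
        · rw [ih rest (by simp at hs; omega) [] (cur.reverse :: acc),
              ih rest (by simp at hs; omega) [] (cur.reverse :: [])]
          simp
        · exact ih rest (by simp at hs; omega) (c :: cur) acc

theorem pv_go_acc (s : List Char) (cur : List Char) (acc : List (List Char)) :
    PySem.Chars.splitlines.go pvIsB s cur acc =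
      acc.reverse ++ PySem.Chars.splitlines.go pvIsB s cur [] :=
  pv_go_acc_aux s.length s le_rfl cur acc

theorem pv_go_append_aux (n : Nat) : ∀ (a : List Char), a.length ≤ n →
    (∀ c, a.getLast? = some c → pvIsB c = false) → a ≠ [] →
    ∀ (cur : List Char) (acc : List (List Char)) (b : List Char),
    PySem.Chars.splitlines.go pvIsB (a ++ '\n' :: b) cur acc =
      PySem.Chars.splitlines.go pvIsB b [] ((PySem.Chars.splitlines.go pvIsB a cur acc).reverse) := by
  induction n with
  | zero =>
    intro a ha _ hne
    rw [List.length_eq_zero_iff.1 (Nat.le_zero.1 ha)] at hne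
    exact absurd rfl hne
  | succ n ih =>
    intro a ha hlast hne cur acc b
    cases a with
    | nil => exact absurd rfl hne
    | cons c a' =>
      cases a' with
      | nil =>
        have hc : pvIsB c = false := hlast c rfl
        have hcr : ¬ (c = '\r' ∧ (('\n' :: b) : List Char).head? = some '\n') := by
          rintro ⟨h1, -⟩; subst h1; simp [pvIsB] at hc
        rw [List.cons_append, List.nil_append,
            pv_go_cons' c ('\n' :: b) cur acc hcr, hc]
        simp only [Bool.false_eq_true, if_false]
        rw [pv_go_cons' '\n' b (c :: cur) acc (by rintro ⟨h1, -⟩; exact absurd h1 (by decide))]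
        have : pvIsB '\n' = true := by decide
        rw [this]
        simp only [if_true]
        rw [pv_go_cons' c [] cur acc (by rintro ⟨-, h2⟩; simp at h2), hc]
        simp only [Bool.false_eq_true, if_false]
        rw [pv_go_nil']
        simp
      | cons c2 a'' =>
        have hne' : (c2 :: a'') ≠ [] := by simp
        have hlast' : ∀ d, (c2 :: a'').getLast? = some d → pvIsB d = false := by
          intro d hd
          exact hlast d (by rw [pv_getLast?_cons c hne', hd])
        by_cases hcr : c = '\r' ∧ ((c2 :: a'') : List Char).head? = some '\n'
        · obtain ⟨h1, h2⟩ := hcr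
          simp at h2
          subst h1; subst h2
          have hne'' : a'' ≠ [] := by
            intro hnil
            subst hnil
            have := hlast' '\n' rfl
            simp [pvIsB] at this
          have hlast'' : ∀ d, a''.getLast? = some d → pvIsB d = false := by
            intro d hd
            exact hlast' d (by rw [pv_getLast?_cons '\n' hne'', hd])
          rw [List.cons_append, List.cons_append, pv_go_crlf', pv_go_crlf']
          exact ih a'' (by simp at ha; omega) hlast'' hne'' [] (cur.reverse :: acc) b
        · have hcr2 : ¬ (c = '\r' ∧ ((c2 :: a'') ++ '\n' :: b).head? = some '\n') := by
            rintro ⟨h1, h2⟩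
            rw [List.head?_append_of_ne_nil _ hne'] at h2
            exact hcr ⟨h1, h2⟩
          rw [List.cons_append, pv_go_cons' c ((c2 :: a'') ++ '\n' :: b) cur acc hcr2,
              pv_go_cons' c (c2 :: a'') cur acc hcr]
          split
          · exact ih (c2 :: a'') (by simp at ha; simp; omega) hlast' hne' [] (cur.reverse :: acc) b
          · exact ih (c2 :: a'') (by simp at ha; simp; omega) hlast' hne' (c :: cur) acc b

theorem pv_splitlines_append {a : List Char} (b : List Char)
    (ha : ∀ c, a.getLast? = some c → pvIsB c = false) (hne : a ≠ []) :
    PySem.Chars.splitlines (a ++ '\n' :: b) =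
      PySem.Chars.splitlines a ++ PySem.Chars.splitlines b := by
  rw [pv_splitlines_go, pv_splitlines_go a, pv_splitlines_go b]
  rw [pv_go_append_aux a.length a le_rfl ha hne [] [] b]
  rw [pv_go_acc b [] ((PySem.Chars.splitlines.go pvIsB a [] []).reverse)]
  simp


def pvNE (p : List Char) : List (List Char) :=
  ((PySem.Chars.splitlines p).map PySem.Chars.strip).filter (fun l => !l.isEmpty)

theorem pv_go_acc_mem_aux (n : Nat) : ∀ (s : List Char), s.length ≤ n →
    ∀ (cur : List Char) (acc : List (List Char)) (l : List Char),
    l ∈ acc → l ∈ PySem.Chars.splitlines.go pvIsB s cur acc := by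
  induction n with
  | zero =>
    intro s hs cur acc l hl
    rw [List.length_eq_zero_iff.1 (Nat.le_zero.1 hs), pv_go_nil']
    split <;> simp [hl]
  | succ n ih =>
    intro s hs cur acc l hl
    cases s with
    | nil => rw [pv_go_nil']; split <;> simp [hl]
    | cons c rest =>
      by_cases hcr : c = '\r' ∧ rest.head? = some '\n'
      · obtain ⟨h1, h2⟩ := hcr
        cases rest with
        | nil => simp at h2
        | cons c2 rest' =>
          simp at h2; subst h1; subst h2
          rw [pv_go_crlf']
          exact ih rest' (by simp at hs; omega) [] (cur.reverse :: acc) l (by simp [hl])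
      · rw [pv_go_cons' c rest cur acc hcr]
        split
        · exact ih rest (by simp at hs; omega) [] (cur.reverse :: acc) l (by simp [hl])
        · exact ih rest (by simp at hs; omega) (c :: cur) acc l hl

theorem pv_go_exists_aux (n : Nat) : ∀ (s : List Char), s.length ≤ n →
    ∀ (cur : List Char) (acc : List (List Char)) (c : Char),
    pvIsB c = false → (c ∈ s ∨ c ∈ cur) →
    ∃ l ∈ PySem.Chars.splitlines.go pvIsB s cur acc, c ∈ l := by
  induction n with
  | zero =>
    intro s hs cur acc c hB hmem
    rw [List.length_eq_zero_iff.1 (Nat.le_zero.1 hs)] at hmem ⊢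
    rw [pv_go_nil']
    rcases hmem with h | h
    · simp at h
    · have : ¬ cur.isEmpty := by cases cur <;> simp_all
      rw [if_neg this]
      exact ⟨cur.reverse, by simp, by simp [h]⟩
  | succ n ih =>
    intro s hs cur acc c hB hmem
    cases s with
    | nil =>
      rw [pv_go_nil']
      rcases hmem with h | h
      · simp at h
      · have : ¬ cur.isEmpty := by cases cur <;> simp_all
        rw [if_neg this]
        exact ⟨cur.reverse, by simp, by simp [h]⟩
    | cons c1 rest =>
      by_cases hcr : c1 = '\r' ∧ rest.head? = some '\n'
      · obtain ⟨h1, h2⟩ := hcr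
        cases rest with
        | nil => simp at h2
        | cons c2 rest' =>
          simp at h2; subst h1; subst h2
          rw [pv_go_crlf']
          rcases hmem with h | h
          · simp at h
            rcases h with h | h | h
            · subst h; simp [pvIsB] at hB
            · subst h; simp [pvIsB] at hB
            · exact ih rest' (by simp at hs; omega) [] (cur.reverse :: acc) c hB (Or.inl h)
          · exact ⟨cur.reverse, pv_go_acc_mem_aux rest'.length rest' le_rfl [] _ _ (by simp), by simp [h]⟩
      · rw [pv_go_cons' c1 rest cur acc hcr]
        by_cases hb1 : pvIsB c1
        · rw [if_pos hb1]
          rcases hmem with h | h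
          · simp at h
            rcases h with h | h
            · subst h; rw [hb1] at hB; simp at hB
            · exact ih rest (by simp at hs; omega) [] (cur.reverse :: acc) c hB (Or.inl h)
          · exact ⟨cur.reverse, pv_go_acc_mem_aux rest.length rest le_rfl [] _ _ (by simp), by simp [h]⟩
        · rw [if_neg hb1]
          rcases hmem with h | h
          · simp at h
            rcases h with h | h
            · subst h
              exact ih rest (by simp at hs; omega) (c :: cur) acc c hB (Or.inr (by simp))
            · exact ih rest (by simp at hs; omega) (c1 :: cur) acc c hB (Or.inl h)
          · exact ih rest (by simp at hs; omega) (c1 :: cur) acc c hB (Or.inr (by simp [h]))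

theorem pv_NE_ne_nil {s : List Char} (hstr : PySem.Chars.strip s = s) (h : s ≠ []) :
    pvNE s ≠ [] := by
  cases s with
  | nil => exact absurd rfl h
  | cons c t =>
    have hws : PySem.Chars.isspace c = false := pv_head_strip (l := c :: t) (by rw [hstr]; rfl)
    have hB : pvIsB c = false := by
      cases hb : pvIsB c
      · rfl
      · rw [pv_isB_isspace hb] at hws; simp at hws
    obtain ⟨l, hl, hcl⟩ := pv_go_exists_aux (c :: t).length (c :: t) le_rfl [] [] c hB (Or.inl (by simp))
    rw [← pv_splitlines_go] at hl
    intro hNE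
    have hmem : PySem.Chars.strip l ∈ pvNE (c :: t) := by
      apply List.mem_filter.2
      refine ⟨List.mem_map.2 ⟨l, hl, rfl⟩, ?_⟩
      cases hsl : PySem.Chars.strip l with
      | nil =>
        rw [pv_strip_eq_nil_iff] at hsl
        rw [hsl c hcl] at hws
        simp at hws
      | cons a b => simp
    rw [hNE] at hmem
    simp at hmem

theorem pv_scan_head (rs : List (List Char)) :
    pvScanRev rs = ((rs.map PySem.Chars.strip).filter (fun l => !l.isEmpty)).head? := by
  induction rs with
  | nil => rfl
  | cons l ls ih =>
    simp only [pvScanRev, List.map_cons, List.filter_cons]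
    cases hsl : PySem.Chars.strip l with
    | nil => simpa using ih
    | cons a b => simp

theorem pv_scan_rev (s : List Char) :
    pvScanRev (PySem.Chars.splitlines s).reverse = (pvNE s).getLast? := by
  rw [pv_scan_head, pvNE]
  simp only [List.map_reverse, List.filter_reverse, List.head?_reverse]

theorem pv_NE_append {a : List Char} (b : List Char)
    (ha : ∀ c, a.getLast? = some c → pvIsB c = false) (hne : a ≠ []) :
    pvNE (a ++ '\n' :: b) = pvNE a ++ pvNE b := by
  rw [pvNE, pv_splitlines_append b ha hne]
  simp [pvNE]

theorem pv_getLast_strip_notB {p : List Char} {c : Char}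
    (h : (PySem.Chars.strip p).getLast? = some c) : pvIsB c = false := by
  cases hb : pvIsB c
  · rfl
  · have hc := pv_getLast_strip h
    rw [pv_isB_isspace hb] at hc
    exact hc

theorem pvNE_nil : pvNE [] = [] := rfl

theorem pv_strip_nil : PySem.Chars.strip [] = [] := rfl

-- the tail of port A after `text` is computed (proof-side abbreviation; defeq to A's body)
def pvATail (text : List Char) : String :=
  if text.isEmpty then "pass" else
    let lines := ((PySem.Chars.splitlines text).map PySem.Chars.strip).filter (fun l => !l.isEmpty)
    let summary := PySem.List.pyGetD lines (-1) []
    if 240 < PySem.Chars.len summary then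
      String.ofList (PySem.Chars.slice summary none (some 237) ++ "...".toList)
    else
      String.ofList summary

theorem pv_A_eq (stdout stderr : String) :
    summarize_output stdout stderr = pvATail (PySem.Chars.strip (PySem.Chars.join ['\n']
      (([stdout.toList, stderr.toList].filter (fun p => !(PySem.Chars.strip p).isEmpty)).map PySem.Chars.strip))) := rfl

theorem pv_A_tail_eq {t : List Char} (ht : t ≠ []) (hne : pvNE t ≠ []) :
    pvATail t = pvTrunc ((pvNE t).getLast hne) := by
  unfold pvATail
  rw [if_neg (by simpa [List.isEmpty_iff] using ht)]
  have hlines : ((PySem.Chars.splitlines t).map PySem.Chars.strip).filter (fun l => !l.isEmpty) = pvNE t := rfl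
  simp only [hlines]
  rw [PySem.List.pyGetD_neg_one _ _ hne]
  rfl

theorem pv_B_eq (stdout stderr : String) :
    summarize_output_alt stdout stderr =
      (match (pvNE (PySem.Chars.strip stderr.toList)).getLast? with
       | some s => pvTrunc s
       | none =>
         match (pvNE (PySem.Chars.strip stdout.toList)).getLast? with
         | some s => pvTrunc s
         | none => "pass") := by
  simp only [summarize_output_alt, pv_scan_rev]

theorem summarize_output_spec : Claim_equal_summarize_output := by
  intro stdout stderr _
  unfold Spec_summarize_output
  rw [pv_A_eq, pv_B_eq]
  by_cases h1 : PySem.Chars.strip stdout.toList = [] <;>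
    by_cases h2 : PySem.Chars.strip stderr.toList = []
  · -- both parts all-whitespace: "pass" on both sides
    have htext : PySem.Chars.strip (PySem.Chars.join ['\n']
        (([stdout.toList, stderr.toList].filter (fun p => !(PySem.Chars.strip p).isEmpty)).map PySem.Chars.strip)) =
        ([] : List Char) := by
      simp [h1, h2, PySem.Chars.join, List.intercalate, pv_strip_nil]
    rw [htext, h1, h2]
    rfl
  · -- stdout all-whitespace: the summary comes from stderr alone
    have hne := pv_NE_ne_nil (pv_strip_idem stderr.toList) h2
    have htext : PySem.Chars.strip (PySem.Chars.join ['\n']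
        (([stdout.toList, stderr.toList].filter (fun p => !(PySem.Chars.strip p).isEmpty)).map PySem.Chars.strip)) =
        PySem.Chars.strip stderr.toList := by
      simp [h1, h2, PySem.Chars.join, List.intercalate, pv_strip_idem]
    rw [htext, pv_A_tail_eq h2 hne, List.getLast?_eq_some_getLast hne]
  · -- stderr all-whitespace: the summary comes from stdout alone
    have hne := pv_NE_ne_nil (pv_strip_idem stdout.toList) h1
    have htext : PySem.Chars.strip (PySem.Chars.join ['\n']
        (([stdout.toList, stderr.toList].filter (fun p => !(PySem.Chars.strip p).isEmpty)).map PySem.Chars.strip)) =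
        PySem.Chars.strip stdout.toList := by
      simp [h1, h2, PySem.Chars.join, List.intercalate, pv_strip_idem]
    rw [htext, pv_A_tail_eq h1 hne, h2, pvNE_nil]
    simp only [List.getLast?_nil]
    rw [List.getLast?_eq_some_getLast hne]
  · -- both parts carry text: stderr's last non-empty line wins on both sides
    have hne2 := pv_NE_ne_nil (pv_strip_idem stderr.toList) h2
    have htext : PySem.Chars.strip (PySem.Chars.join ['\n']
        (([stdout.toList, stderr.toList].filter (fun p => !(PySem.Chars.strip p).isEmpty)).map PySem.Chars.strip)) =
        PySem.Chars.strip stdout.toList ++ '\n' :: PySem.Chars.strip stderr.toList := by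
      have hj : PySem.Chars.join ['\n']
          (([stdout.toList, stderr.toList].filter (fun p => !(PySem.Chars.strip p).isEmpty)).map PySem.Chars.strip) =
          PySem.Chars.strip stdout.toList ++ '\n' :: PySem.Chars.strip stderr.toList := by
        simp [h1, h2, PySem.Chars.join, List.intercalate]
      rw [hj]
      exact pv_strip_append (pv_strip_idem stdout.toList) (pv_strip_idem stderr.toList) h1 h2
    have hNEapp : pvNE (PySem.Chars.strip stdout.toList ++ '\n' :: PySem.Chars.strip stderr.toList) =
        pvNE (PySem.Chars.strip stdout.toList) ++ pvNE (PySem.Chars.strip stderr.toList) :=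
      pv_NE_append _ (fun c hc => pv_getLast_strip_notB hc) h1
    have hne : pvNE (PySem.Chars.strip stdout.toList ++ '\n' :: PySem.Chars.strip stderr.toList) ≠ [] := by
      rw [hNEapp]
      simp only [ne_eq, List.append_eq_nil_iff]
      rintro ⟨-, hnil⟩
      exact hne2 hnil
    have hlast : (pvNE (PySem.Chars.strip stdout.toList ++ '\n' :: PySem.Chars.strip stderr.toList)).getLast hne =
        (pvNE (PySem.Chars.strip stderr.toList)).getLast hne2 := by
      have h? : (pvNE (PySem.Chars.strip stdout.toList ++ '\n' :: PySem.Chars.strip stderr.toList)).getLast? =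
          (pvNE (PySem.Chars.strip stderr.toList)).getLast? := by
        rw [hNEapp]
        exact List.getLast?_append_of_ne_nil _ hne2
      rw [List.getLast?_eq_some_getLast hne, List.getLast?_eq_some_getLast hne2] at h?
      exact Option.some.inj h?
    rw [htext, pv_A_tail_eq (by simp) hne, hlast, List.getLast?_eq_some_getLast hne2]
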